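-- pv_equiv track=rewrite | github.com/ProvotL/TIPE | main.py | Liste_des_temporaire_de_degre_2
-- ===== SOURCE A (Python) =====
-- def Liste_des_temporaire_de_degre_2(position):
--     """fonction utilisée bien plus (renome_dans_lordre) haut quels temporels sont présents dans une position"""
--     #RQ : Fonctionne aussi pour les regions
--     liste = [0,0,0] # premier indice pour "4", deuxième pour "5", troisième pour "6"
--     for i in position :
--         if i == "4" :
--             liste[0] += 1
--         elif i == "5" :
--             liste[1] += 1
--         elif i == "6" :
--             liste[2] += 1
--     A_remplacer = []
--     for i in range(len(liste)) :
--         if liste[i] == 2 or liste[i] == 1: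
--             if i == 0 :
--                 A_remplacer.append("4")
--             if i == 1 :
--                 A_remplacer.append("5")
--             if i == 2 :
--                 A_remplacer.append("6")
--     return A_remplacer
-- ===== SOURCE B (Python) =====
-- def Liste_des_temporaire_de_degre_2(position):
--     # Sort the temporal symbols, then run-length-encode the sorted list and
--     # keep the symbols of the runs of length 1 or 2 (sorted order = "4","5","6").
--     runs = []
--     for s in sorted(x for x in position if x in ("4", "5", "6")):
--         if runs and runs[-1][0] == s:
--             runs[-1][1] += 1
--         else:
--             runs.append([s, 1])
--     return [s for s, k in runs if k <= 2]
-- ===== Notes on version B (the rewrite author's own statement) =====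
-- stated objective: alternative
-- what changed: Replaces A's one-pass 3-slot tally table plus index-shaped reconstruction loop with a sort / run-length-encode / filter pipeline: the temporal symbols are filtered out, sorted, grouped into runs, and the symbols of runs of length 1 or 2 are returned.
import Mathlib
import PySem

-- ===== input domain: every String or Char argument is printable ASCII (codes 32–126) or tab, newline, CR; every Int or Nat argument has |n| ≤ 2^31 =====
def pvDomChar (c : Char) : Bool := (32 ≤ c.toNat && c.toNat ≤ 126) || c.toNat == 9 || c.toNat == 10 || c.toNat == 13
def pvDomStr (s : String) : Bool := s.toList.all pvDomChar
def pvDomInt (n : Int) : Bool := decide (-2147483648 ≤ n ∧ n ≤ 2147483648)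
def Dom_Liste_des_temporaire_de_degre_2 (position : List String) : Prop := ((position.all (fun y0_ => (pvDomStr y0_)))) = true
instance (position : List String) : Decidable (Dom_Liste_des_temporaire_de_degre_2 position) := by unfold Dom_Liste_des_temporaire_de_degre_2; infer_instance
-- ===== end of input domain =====

-- B replaces A's one-pass 3-slot count table and index-shaped output loop with a
-- sort / run-length-encode / filter-short-runs pipeline (objective: alternative).

-- ===== PORT A =====
-- liste = [0,0,0] modelled as an Int triple (fixed-size list with constant indices)
def Liste_des_temporaire_de_degre_2 (position : List String) : List String :=
  let liste : Int × Int × Int := position.foldl (fun l i =>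
    if i == "4" then (l.1 + 1, l.2.1, l.2.2)
    else if i == "5" then (l.1, l.2.1 + 1, l.2.2)
    else if i == "6" then (l.1, l.2.1, l.2.2 + 1)
    else l) (0, 0, 0)
  (PySem.List.pyRange 0 3 1).foldl (fun A_remplacer i =>
    let v : Int := if i = 0 then liste.1 else if i = 1 then liste.2.1 else liste.2.2
    if v = 2 ∨ v = 1 then
      let A1 := if i = 0 then A_remplacer ++ ["4"] else A_remplacer
      let A2 := if i = 1 then A1 ++ ["5"] else A1
      if i = 2 then A2 ++ ["6"] else A2
    else A_remplacer) []

-- ===== PORT B =====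
-- one loop step of B: extend the run list `runs` with the next sorted symbol
-- (runs[-1][1] += 1 is modelled as dropLast ++ [(t, k+1)])
def pvRleStep (runs : List (String × Int)) (s : String) : List (String × Int) :=
  match runs.getLast? with
  | some (t, k) => if t == s then runs.dropLast ++ [(t, k + 1)] else runs ++ [(s, 1)]
  | none => runs ++ [(s, 1)]

def Liste_des_temporaire_de_degre_2_alt (position : List String) : List String :=
  let runs := (PySem.List.sorted (position.filter (fun x => x ∈ (["4", "5", "6"] : List String))) (fun x => x) false).foldl pvRleStep []
  (runs.filter (fun p => p.2 ≤ 2)).map (fun p => p.1)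

-- ===== PRECONDITION & SPEC =====
def Spec_Liste_des_temporaire_de_degre_2 (position : List String) (out : List String) : Prop := out = Liste_des_temporaire_de_degre_2_alt position
instance (position : List String) (out : List String) : Decidable (Spec_Liste_des_temporaire_de_degre_2 position out) := by unfold Spec_Liste_des_temporaire_de_degre_2; infer_instance

-- ===== CLAIM (what is proved, stated in full; the proofs are below) =====
def Claim_equal_Liste_des_temporaire_de_degre_2 : Prop := ∀ (position : List String), Dom_Liste_des_temporaire_de_degre_2 position → Spec_Liste_des_temporaire_de_degre_2 position (Liste_des_temporaire_de_degre_2 position)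

-- ===== LEMMAS AND PROOFS =====

-- A's counting fold computes the three per-symbol counts.
theorem pv_fold_counts (position : List String) (a b c : Int) :
    position.foldl (fun l i =>
      if i == "4" then (l.1 + 1, l.2.1, l.2.2)
      else if i == "5" then (l.1, l.2.1 + 1, l.2.2)
      else if i == "6" then (l.1, l.2.1, l.2.2 + 1)
      else l) ((a, b, c) : Int × Int × Int)
    = (a + position.count "4", b + position.count "5", c + position.count "6") := by
  induction position generalizing a b c with
  | nil => simp
  | cons x xs ih =>
    rw [List.foldl_cons]
    by_cases h4 : x = "4"
    · subst h4
      rw [if_pos (by simp), ih]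
      simp [Prod.ext_iff]; omega
    · by_cases h5 : x = "5"
      · subst h5
        rw [if_neg (by simp), if_pos (by simp), ih]
        simp [Prod.ext_iff, h4]; omega
      · by_cases h6 : x = "6"
        · subst h6
          rw [if_neg (by simp), if_neg (by simp), if_pos (by simp), ih]
          simp [Prod.ext_iff, h4, h5]; omega
        · rw [if_neg (by simp [h4]), if_neg (by simp [h5]), if_neg (by simp [h6]), ih]
          simp [h4, h5, h6]

-- folding the RLE step over a block of equal symbols extends the current run
theorem pv_rle_same (acc : List (String × Int)) (s : String) (k : Int) (m : Nat) :
    (List.replicate m s).foldl pvRleStep (acc ++ [(s, k)]) = acc ++ [(s, k + m)] := by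
  induction m generalizing k with
  | zero => simp
  | succ m ih =>
    rw [List.replicate_succ, List.foldl_cons]
    have : pvRleStep (acc ++ [(s, k)]) s = acc ++ [(s, k + 1)] := by
      simp [pvRleStep]
    rw [this, ih]
    simp; ring

-- folding the RLE step over a fresh block of n copies of s appends one run (s, n)
theorem pv_rle_replicate (acc : List (String × Int)) (s : String) (n : Nat)
    (h : ∀ p ∈ acc.getLast?, p.1 ≠ s) :
    (List.replicate n s).foldl pvRleStep acc =
      if n = 0 then acc else acc ++ [(s, (n : Int))] := by
  cases n with
  | zero => simp
  | succ m =>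
    rw [List.replicate_succ, List.foldl_cons]
    have hstep : pvRleStep acc s = acc ++ [(s, 1)] := by
      unfold pvRleStep
      cases hl : acc.getLast? with
      | none => simp
      | some p =>
        have := h p (by simp [hl])
        cases p with
        | mk t k => simp_all
    rw [hstep, pv_rle_same]
    simp; ring

-- the sorted filtered list is exactly the three blocks of "4","5","6"
theorem pv_sorted_blocks (position : List String) :
    PySem.List.sorted (position.filter (fun x => x ∈ (["4", "5", "6"] : List String))) (fun x => x) false
      = List.replicate (position.count "4") "4" ++ List.replicate (position.count "5") "5"
        ++ List.replicate (position.count "6") "6" := by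
  apply PySem.List.sorted_id_eq_of_perm_of_pairwise
  · rw [List.perm_iff_count]
    intro x
    simp only [List.count_append, List.count_replicate]
    by_cases h4 : x = "4"
    · subst h4; rw [List.count_filter] <;> simp
    · by_cases h5 : x = "5"
      · subst h5; rw [List.count_filter] <;> simp
      · by_cases h6 : x = "6"
        · subst h6; rw [List.count_filter] <;> simp
        · have hz : List.count x (position.filter (fun x => x ∈ (["4", "5", "6"] : List String))) = 0 := by
            rw [List.count_eq_zero]
            intro hm
            have := (List.mem_filter.1 hm).2
            simp_all
          rw [hz]
          simp [Ne.symm h4, Ne.symm h5, Ne.symm h6]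
  · refine List.pairwise_append.2 ⟨List.pairwise_append.2 ⟨?_, ?_, ?_⟩, ?_, ?_⟩
    · exact List.pairwise_replicate.2 (by simp)
    · exact List.pairwise_replicate.2 (by simp)
    · intro x hx y hy
      rw [List.eq_of_mem_replicate hx, List.eq_of_mem_replicate hy]
      exact le_of_lt (by rw [String.lt_iff_toList_lt]; decide)
    · exact List.pairwise_replicate.2 (by simp)
    · intro x hx y hy
      rw [List.eq_of_mem_replicate hy]
      rcases List.mem_append.1 hx with h | h <;> rw [List.eq_of_mem_replicate h] <;>
        exact le_of_lt (by rw [String.lt_iff_toList_lt]; decide)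

-- filtering and projecting the single conditional run of symbol s with count n
theorem pv_run_out (s : String) (n : Nat) :
    ((if n = 0 then ([] : List (String × Int)) else [(s, (n : Int))]).filter
        (fun p => p.2 ≤ 2)).map (fun p => p.1)
      = if (n : Int) = 2 ∨ (n : Int) = 1 then [s] else [] := by
  by_cases h0 : n = 0
  · simp [h0]
  · rw [if_neg h0]
    by_cases h2 : (n : Int) ≤ 2
    · rw [if_pos (by omega)]
      simp [h2]
    · rw [if_neg (by omega)]
      simp [h2]

-- ===== VERDICT (by name: the statement is the Claim_ definition above) =====
theorem Liste_des_temporaire_de_degre_2_spec : Claim_equal_Liste_des_temporaire_de_degre_2 := by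
  intro position _
  show _ = _
  unfold Liste_des_temporaire_de_degre_2 Liste_des_temporaire_de_degre_2_alt
  rw [pv_fold_counts, pv_sorted_blocks]
  simp only [zero_add]
  set a := position.count "4" with ha
  set b := position.count "5" with hb
  set c := position.count "6" with hc
  have hruns : (List.replicate a "4" ++ List.replicate b "5" ++ List.replicate c "6").foldl pvRleStep [] =
      (if a = 0 then [] else [("4", (a : Int))]) ++ (if b = 0 then [] else [("5", (b : Int))])
        ++ (if c = 0 then [] else [("6", (c : Int))]) := by
    rw [List.foldl_append, List.foldl_append, pv_rle_replicate [] "4" a (by simp)]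
    by_cases h0a : a = 0
    · rw [if_pos h0a, pv_rle_replicate [] "5" b (by simp)]
      by_cases h0b : b = 0
      · rw [if_pos h0b, pv_rle_replicate [] "6" c (by simp)]
        simp [h0a, h0b]
      · rw [if_neg h0b, pv_rle_replicate _ "6" c (by simp)]
        by_cases h0c : c = 0 <;> simp [h0a, h0b, h0c]
    · rw [if_neg h0a, pv_rle_replicate _ "5" b (by simp)]
      by_cases h0b : b = 0
      · rw [if_pos h0b, pv_rle_replicate _ "6" c (by simp)]
        by_cases h0c : c = 0 <;> simp [h0a, h0b, h0c]
      · rw [if_neg h0b, pv_rle_replicate _ "6" c (by simp)]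
        by_cases h0c : c = 0 <;> simp [h0a, h0b, h0c]
  rw [hruns]
  rw [List.filter_append, List.filter_append, List.map_append, List.map_append,
    pv_run_out "4" a, pv_run_out "5" b, pv_run_out "6" c]
  have hr : PySem.List.pyRange 0 3 1 = [0, 1, 2] := by decide
  rw [hr]
  simp only [List.foldl_cons, List.foldl_nil]
  norm_num
  split_ifs <;> rfl
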